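-- pv_equiv track=rewrite | github.com/krushchavan/lkml-reviews | thread_analyzer.py | _has_inline_review
-- ===== SOURCE A (Python) =====
-- def _has_inline_review(body: str) -> bool:
--     """Check if a message contains inline code review (quoted + commentary pattern)."""
--     lines = body.split("\n")
--     had_quote = False
--     for line in lines:
--         stripped = line.strip()
--         if stripped.startswith(">"):
--             had_quote = True
--         elif had_quote and stripped and not stripped.startswith("--"):
--             # Non-empty non-sig line right after a quote = inline review
--             return True
--     return False
-- ===== SOURCE B (Python) =====
-- def _has_inline_review(body: str) -> bool:
--     """Positional formulation: collect the indices of quote lines and of commentary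
--     lines, then compare positions: inline review iff the first quote line occurs
--     before the last commentary line."""
--     stripped = [line.strip() for line in body.split("\n")]
--     quotes = [i for i, s in enumerate(stripped) if s.startswith(">")]
--     comments = [i for i, s in enumerate(stripped)
--                 if s and not s.startswith(">") and not s.startswith("--")]
--     return bool(quotes) and bool(comments) and quotes[0] < comments[-1]
-- ===== Notes on version B (the rewrite author's own statement) =====
-- stated objective: alternative
-- what changed: Replaced A's stateful latch-loop with a positional formulation: build the list of quote-line indices and the list of commentary-line indices via comprehensions over enumerate, and answer by comparing positions (first quote index < last commentary index); no conditional scan or latch remains.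
import Mathlib
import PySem

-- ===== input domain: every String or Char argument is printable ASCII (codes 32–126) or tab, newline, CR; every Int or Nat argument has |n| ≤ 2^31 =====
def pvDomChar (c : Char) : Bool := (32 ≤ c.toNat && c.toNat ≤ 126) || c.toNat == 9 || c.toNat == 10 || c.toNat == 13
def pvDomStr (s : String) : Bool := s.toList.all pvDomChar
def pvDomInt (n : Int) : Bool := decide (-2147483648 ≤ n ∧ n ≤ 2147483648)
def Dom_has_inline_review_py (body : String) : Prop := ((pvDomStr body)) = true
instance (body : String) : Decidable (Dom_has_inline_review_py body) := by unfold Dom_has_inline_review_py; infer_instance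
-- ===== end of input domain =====

-- B replaces A's stateful latch-loop by a positional formulation: collect the quote-line
-- indices and the commentary-line indices, and compare first quote index < last commentary index.

-- ===== PORT A =====
-- the for-loop with its had_quote latch and early return
def pvGoA : List String → Bool → Bool
  | [], _ => false
  | line :: rest, hadQuote =>
    let stripped := PySem.Str.strip line
    if PySem.Str.startswith stripped ">" then pvGoA rest true
    else if hadQuote && !(stripped == "") && !(PySem.Str.startswith stripped "--") then true
    else pvGoA rest hadQuote

def has_inline_review_py (body : String) : Bool :=
  -- body.split("\n"): sep "\n" ≠ "" so split? is always `some`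
  pvGoA ((PySem.Str.split? body "\n").getD []) false

-- ===== PORT B =====
def pvQ (s : String) : Bool := PySem.Str.startswith s ">"
def pvC (s : String) : Bool :=
  !(s == "") && !(PySem.Str.startswith s ">") && !(PySem.Str.startswith s "--")

def has_inline_review_py_alt (body : String) : Bool :=
  let stripped := ((PySem.Str.split? body "\n").getD []).map PySem.Str.strip
  let quotes := (PySem.List.enumerate stripped 0).filterMap
    (fun p => if pvQ p.2 then some p.1 else none)
  let comments := (PySem.List.enumerate stripped 0).filterMap
    (fun p => if pvC p.2 then some p.1 else none)
  match quotes.head?, comments.getLast? with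
  | some q0, some cl => decide (q0 < cl)
  | _, _ => false

-- ===== PRECONDITION & SPEC =====
def Spec_has_inline_review_py (body : String) (out : Bool) : Prop := out = has_inline_review_py_alt body
instance (body : String) (out : Bool) : Decidable (Spec_has_inline_review_py body out) := by unfold Spec_has_inline_review_py; infer_instance

-- ===== CLAIM (what is proved, stated in full; the proofs are below) =====
def Claim_equal_has_inline_review_py : Prop := ∀ (body : String), Dom_has_inline_review_py body → Spec_has_inline_review_py body (has_inline_review_py body)

-- ===== LEMMAS AND PROOFS =====

-- abbreviations for B's two index lists, over an arbitrary enumerate start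
def pvQIdx (S : List String) (s : Int) : List Int :=
  (PySem.List.enumerate S s).filterMap (fun p => if pvQ p.2 then some p.1 else none)
def pvCIdx (S : List String) (s : Int) : List Int :=
  (PySem.List.enumerate S s).filterMap (fun p => if pvC p.2 then some p.1 else none)

theorem pvQIdx_cons (l : String) (S : List String) (s : Int) :
    pvQIdx (l :: S) s = (if pvQ l then [s] else []) ++ pvQIdx S (s + 1) := by
  simp only [pvQIdx, PySem.List.enumerate_cons, List.filterMap_cons]
  split_ifs <;> simp_all

theorem pvCIdx_cons (l : String) (S : List String) (s : Int) :
    pvCIdx (l :: S) s = (if pvC l then [s] else []) ++ pvCIdx S (s + 1) := by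
  simp only [pvCIdx, PySem.List.enumerate_cons, List.filterMap_cons]
  split_ifs <;> simp_all

-- every collected index is at least the enumerate start
theorem pvCIdx_lb {S : List String} {s b : Int} (hb : b ∈ pvCIdx S s) : s ≤ b := by
  simp only [pvCIdx, List.mem_filterMap] at hb
  obtain ⟨p, hp, hf⟩ := hb
  have h1 : s ≤ p.1 := by
    rw [PySem.List.mem_enumerate_iff] at hp
    obtain ⟨k, hk, rfl⟩ := hp
    simp
  by_cases h : pvC p.2 = true
  · rw [if_pos h] at hf
    injection hf with hf
    omega
  · rw [if_neg h] at hf; exact absurd hf (by simp)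

theorem pvQIdx_lb {S : List String} {s b : Int} (hb : b ∈ pvQIdx S s) : s ≤ b := by
  simp only [pvQIdx, List.mem_filterMap] at hb
  obtain ⟨p, hp, hf⟩ := hb
  have h1 : s ≤ p.1 := by
    rw [PySem.List.mem_enumerate_iff] at hp
    obtain ⟨k, hk, rfl⟩ := hp
    simp
  by_cases h : pvQ p.2 = true
  · rw [if_pos h] at hf
    injection hf with hf
    omega
  · rw [if_neg h] at hf; exact absurd hf (by simp)

-- pvCIdx is empty exactly when no line is a commentary line
theorem pvCIdx_eq_nil_iff (S : List String) (s : Int) :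
    pvCIdx S s = [] ↔ S.any pvC = false := by
  induction S generalizing s with
  | nil => simp [pvCIdx, PySem.List.enumerate_nil]
  | cons l S ih =>
    rw [pvCIdx_cons]
    by_cases h : pvC l = true <;> simp [h, ih]

-- a quote line is never a commentary line
theorem pvC_of_pvQ {s : String} (hq : pvQ s = true) : pvC s = false := by
  unfold pvQ at hq
  unfold pvC
  rw [hq]
  simp

-- once the latch is set, A's loop is an existence scan over the rest
theorem pvGoA_true (ls : List String) :
    pvGoA ls true = ls.any (fun l => pvC (PySem.Str.strip l)) := by
  induction ls with
  | nil => rfl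
  | cons l ls ih =>
    by_cases h : PySem.Chars.startswith (PySem.Chars.strip l.toList) ['>'] = true
    · simp [pvGoA, pvC, h, ih]
    · by_cases h2 : PySem.Str.strip l = ""
      · simp [pvGoA, pvC, h, h2, ih]
      · by_cases h3 : PySem.Chars.startswith (PySem.Chars.strip l.toList) ['-', '-'] = true
        · simp [pvGoA, pvC, h, h3, ih]
        · simp [pvGoA, pvC, h, h2, h3]

-- the core correspondence, for every enumerate start
theorem pvGoA_eq_idx (S : List String) (s : Int) :
    pvGoA S false =
      (match (pvQIdx (S.map PySem.Str.strip) s).head?,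
             (pvCIdx (S.map PySem.Str.strip) s).getLast? with
       | some q0, some cl => decide (q0 < cl)
       | _, _ => false) := by
  induction S generalizing s with
  | nil => simp [pvGoA, pvQIdx, pvCIdx, PySem.List.enumerate_nil]
  | cons l S ih =>
    simp only [List.map_cons, pvQIdx_cons, pvCIdx_cons]
    by_cases hq : pvQ (PySem.Str.strip l) = true
    · -- first line is a quote: A scans the rest with the latch set
      rw [show pvGoA (l :: S) false = pvGoA S true by
            simp only [pvGoA]
            rw [if_pos (by simpa [pvQ] using hq)]]
      rw [pvGoA_true]
      simp only [hq, pvC_of_pvQ hq, if_true, Bool.false_eq_true, if_false,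
        List.nil_append, List.singleton_append, List.head?_cons]
      rcases hcl : (pvCIdx (S.map PySem.Str.strip) (s + 1)).getLast? with _ | b
      · rw [List.getLast?_eq_none_iff, pvCIdx_eq_nil_iff] at hcl
        simp only [List.any_map, Function.comp_def] at hcl
        simpa using hcl
      · have hb : s + 1 ≤ b := pvCIdx_lb (List.mem_of_getLast? hcl)
        have hne : (S.map PySem.Str.strip).any pvC = true := by
          rw [← Bool.not_eq_false, ← pvCIdx_eq_nil_iff _ (s + 1)]
          intro h; rw [h] at hcl; simp at hcl
        simp only [List.any_map, Function.comp_def] at hne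
        rw [hne]
        have : s < b := by omega
        simp [this]
    · -- first line is not a quote
      rw [show pvGoA (l :: S) false = pvGoA S false by
            simp only [pvGoA]
            rw [if_neg (by simpa [pvQ] using hq), if_neg (by simp)]]
      rw [ih (s + 1)]
      simp only [hq, Bool.false_eq_true, if_false, List.nil_append]
      by_cases hc : pvC (PySem.Str.strip l) = true
      · simp only [hc, if_true, List.singleton_append]
        rcases hq0 : (pvQIdx (S.map PySem.Str.strip) (s + 1)).head? with _ | a
        · rcases hcl : (pvCIdx (S.map PySem.Str.strip) (s + 1)).getLast? with _ | b
          · have hnil : pvCIdx (S.map PySem.Str.strip) (s + 1) = [] := by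
              rwa [List.getLast?_eq_none_iff] at hcl
            rw [hnil]
          · rw [List.getLast?_cons, hcl]
        · have ha : s + 1 ≤ a := pvQIdx_lb (List.mem_of_mem_head? hq0)
          rcases hcl : (pvCIdx (S.map PySem.Str.strip) (s + 1)).getLast? with _ | b
          · have hnil : pvCIdx (S.map PySem.Str.strip) (s + 1) = [] := by
              rwa [List.getLast?_eq_none_iff] at hcl
            rw [hnil]
            have : ¬ a < s := by omega
            simp [List.getLast?_singleton, this]
          · rw [List.getLast?_cons, hcl]
            rfl
      · simp [hc]

-- ===== VERDICT (by name: the statement is the Claim_ definition above) =====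
theorem has_inline_review_py_spec : Claim_equal_has_inline_review_py := by
  intro body _
  unfold Spec_has_inline_review_py has_inline_review_py has_inline_review_py_alt
  simpa [pvQIdx, pvCIdx] using pvGoA_eq_idx ((PySem.Str.split? body "\n").getD []) 0
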